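-- pv_equiv track=rewrite | github.com/MrBrantCode/unitest_baseline | mut_generate/mist_train_taco/taco_3088/solution.py | find_max_sum_pair
-- ===== SOURCE A (Python) =====
-- def find_max_sum_pair(arr, n, k):
--     arr.sort()
--     l = 0
--     r = n - 1
--     res = [0, 0]
--     max_sum = -1
--
--     while l < r:
--         sum = arr[l] + arr[r]
--         if sum >= k:
--             r -= 1
--         else:
--             if max_sum < sum:
--                 max_sum = sum
--                 res = [arr[l], arr[r]]
--             l += 1
--
--     return tuple(res)
-- ===== SOURCE B (Python) =====
-- def find_max_sum_pair(arr, n, k):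
--     arr.sort()
--     res = [0, 0]
--     max_sum = -1
--     for i in range(n - 1):
--         for j in range(i + 1, n):
--             s = arr[i] + arr[j]
--             if s < k and s > max_sum:
--                 max_sum = s
--                 res = [arr[i], arr[j]]
--     return tuple(res)
-- ===== Notes on version B (the rewrite author's own statement) =====
-- stated objective: alternative
-- what changed: Replaces the sorted two-pointer converging scan with a brute-force nested loop over all index pairs i<j that keeps the best sum below k; same in-place sort side effect, same return value.
import Mathlib
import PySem

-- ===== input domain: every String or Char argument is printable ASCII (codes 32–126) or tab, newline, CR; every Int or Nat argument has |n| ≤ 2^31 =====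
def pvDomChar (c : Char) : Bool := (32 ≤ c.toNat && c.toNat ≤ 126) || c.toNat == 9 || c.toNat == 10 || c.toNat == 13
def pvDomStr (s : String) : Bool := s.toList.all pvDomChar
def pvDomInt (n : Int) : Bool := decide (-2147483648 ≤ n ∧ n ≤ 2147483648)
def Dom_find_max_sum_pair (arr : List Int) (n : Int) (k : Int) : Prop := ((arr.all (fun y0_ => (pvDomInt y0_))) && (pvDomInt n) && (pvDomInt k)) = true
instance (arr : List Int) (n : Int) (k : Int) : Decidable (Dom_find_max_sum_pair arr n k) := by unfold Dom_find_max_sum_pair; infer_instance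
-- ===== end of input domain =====

-- B replaces A's two-pointer scan over the sorted array with a brute-force nested loop over
-- all index pairs i<j keeping the best sum below k (alternative decomposition, same result).
-- Both Pythons sort arr in place; the equivalence proved here is about the return value.

-- ===== PORT A =====
-- arr[i] (indices are nonnegative and in range on every access A performs inside Pre_)
def pvGet (s : List Int) (i : Int) : Int := PySem.List.pyGetD s i 0

-- the 'while l < r' loop of A; state st = (res, max_sum)
def pvAGo (s : List Int) (k : Int) (l r : Int) (st : (Int × Int) × Int) : Int × Int :=
  if h : l < r then
    let sum := pvGet s l + pvGet s r
    if sum ≥ k then pvAGo s k l (r - 1) st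
    else if st.2 < sum then pvAGo s k (l + 1) r ((pvGet s l, pvGet s r), sum)
    else pvAGo s k (l + 1) r st
  else st.1
termination_by (r - l).toNat
decreasing_by all_goals omega

def find_max_sum_pair (arr : List Int) (n : Int) (k : Int) : Int × Int :=
  pvAGo (PySem.List.sorted arr (fun x => x) false) k 0 (n - 1) ((0, 0), -1)

-- ===== PORT B =====
-- body of B's inner loop: if s < k and s > max_sum: update res and max_sum
def pvBStep (k : Int) (st : (Int × Int) × Int) (a b : Int) : (Int × Int) × Int :=
  if a + b < k ∧ st.2 < a + b then ((a, b), a + b) else st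

-- B's nested for-loops over the sorted list s
def pvBGo (s : List Int) (n : Int) (k : Int) : Int × Int :=
  ((PySem.List.pyRange 0 (n - 1)).foldl (fun st i =>
      (PySem.List.pyRange (i + 1) n).foldl (fun st j =>
        pvBStep k st (pvGet s i) (pvGet s j)) st)
    ((0, 0), -1)).1

def find_max_sum_pair_alt (arr : List Int) (n : Int) (k : Int) : Int × Int :=
  pvBGo (PySem.List.sorted arr (fun x => x) false) n k

-- ===== PRECONDITION & SPEC =====
-- A (and B) raise IndexError when n exceeds len(arr) and the loop is entered (n ≥ 2); A is total otherwise.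
def Pre_find_max_sum_pair (arr : List Int) (n : Int) (k : Int) : Prop :=
  2 ≤ n → n ≤ (arr.length : Int)
instance (arr : List Int) (n : Int) (k : Int) : Decidable (Pre_find_max_sum_pair arr n k) := by
  unfold Pre_find_max_sum_pair; infer_instance
def pvWitness_find_max_sum_pair : List Int × Int × Int := ([3, 1, 2], 3, 5)

def Spec_find_max_sum_pair (arr : List Int) (n : Int) (k : Int) (out : Int × Int) : Prop := out = find_max_sum_pair_alt arr n k
instance (arr : List Int) (n : Int) (k : Int) (out : Int × Int) : Decidable (Spec_find_max_sum_pair arr n k out) := by unfold Spec_find_max_sum_pair; infer_instance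

-- ===== CLAIM (what is proved, stated in full; the proofs are below) =====
def Claim_equal_find_max_sum_pair : Prop := ∀ (arr : List Int) (n : Int) (k : Int), Dom_find_max_sum_pair arr n k → Pre_find_max_sum_pair arr n k → Spec_find_max_sum_pair arr n k (find_max_sum_pair arr n k)

-- ===== LEMMAS AND PROOFS =====

-- B's double loop with outer index range [l, r) and inner index range (i, r]
def pvBAll (s : List Int) (k : Int) (l r : Int) (st : (Int × Int) × Int) : (Int × Int) × Int :=
  (PySem.List.pyRange l r).foldl (fun st i =>
    (PySem.List.pyRange (i + 1) (r + 1)).foldl (fun st j =>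
      pvBStep k st (pvGet s i) (pvGet s j)) st) st

-- monotone access into a sorted list
lemma pvMono (s : List Int)
    (hs : ∀ p q : Nat, (hpq : p ≤ q) → (hq : q < s.length) → s[p]'(Nat.lt_of_le_of_lt hpq hq) ≤ s[q])
    {i j : Int} (h0 : 0 ≤ i) (hij : i ≤ j) (hj : j < (s.length : Int)) :
    pvGet s i ≤ pvGet s j := by
  unfold pvGet
  rw [PySem.List.pyGetD_eq_getElem s 0 h0 (by omega), PySem.List.pyGetD_eq_getElem s 0 (by omega) hj]
  exact hs i.toNat j.toNat (by omega) (by omega)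

-- two consecutive candidate steps with the same left value collapse to the larger one
lemma pvCollapse (k : Int) (st : (Int × Int) × Int) (x y z : Int)
    (hyz : y ≤ z) (hk : x + z < k) :
    pvBStep k (pvBStep k st x y) x z = pvBStep k st x z := by
  unfold pvBStep
  by_cases h1 : x + y < k ∧ st.2 < x + y
  · rw [if_pos h1]
    by_cases h2 : x + y < x + z
    · rw [if_pos (show x + z < k ∧ ((x, y), x + y).2 < x + z from ⟨hk, h2⟩),
        if_pos (show x + z < k ∧ st.2 < x + z from ⟨hk, by omega⟩)]
    · have hyz' : y = z := by omega
      subst hyz'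
      rw [if_neg (show ¬ (x + y < k ∧ ((x, y), x + y).2 < x + y) from fun hc => by omega),
        if_pos (show x + y < k ∧ st.2 < x + y from h1)]
  · rw [if_neg h1]

-- a whole row of B's inner loop equals the single step against its last column
lemma pvRowFold (s : List Int) (k : Int)
    (hs : ∀ p q : Nat, (hpq : p ≤ q) → (hq : q < s.length) → s[p]'(Nat.lt_of_le_of_lt hpq hq) ≤ s[q])
    (l : Int) (h0 : 0 ≤ l) :
    ∀ m : Nat, ∀ r : Int, (r - l).toNat = m → l < r → r < (s.length : Int) →
      pvGet s l + pvGet s r < k → ∀ st,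
      (PySem.List.pyRange (l + 1) (r + 1)).foldl
        (fun st j => pvBStep k st (pvGet s l) (pvGet s j)) st
      = pvBStep k st (pvGet s l) (pvGet s r) := by
  intro m
  induction m with
  | zero => intro r hm hlr; omega
  | succ m ih =>
    intro r hm hlr hrlen hk st
    rw [PySem.List.pyRange_one_succ_right (by omega), List.foldl_append]
    by_cases hcase : l + 1 < r
    · have hmono : pvGet s (r - 1) ≤ pvGet s r := pvMono s hs (by omega) (by omega) hrlen
      have hk' : pvGet s l + pvGet s (r - 1) < k := by omega
      have hih := ih (r - 1) (by omega) (by omega) (by omega) hk' st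
      rw [show r - 1 + 1 = r by omega] at hih
      rw [hih]
      simp only [List.foldl_cons, List.foldl_nil]
      exact pvCollapse k st (pvGet s l) (pvGet s (r - 1)) (pvGet s r) hmono hk
    · have hr : r = l + 1 := by omega
      subst hr
      rw [PySem.List.pyRange_one_eq_nil (by omega)]
      simp

-- discarding the top index r when arr[l]+arr[r] ≥ k leaves B's fold unchanged
lemma pvColDrop (s : List Int) (k : Int)
    (hs : ∀ p q : Nat, (hpq : p ≤ q) → (hq : q < s.length) → s[p]'(Nat.lt_of_le_of_lt hpq hq) ≤ s[q])
    (l r : Int) (h0 : 0 ≤ l) (hlr : l < r) (hrlen : r < (s.length : Int))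
    (hk : pvGet s l + pvGet s r ≥ k) (st : (Int × Int) × Int) :
    pvBAll s k l r st = pvBAll s k l (r - 1) st := by
  have hnoop : ∀ i : Int, l ≤ i → i < r → ∀ st' : (Int × Int) × Int,
      pvBStep k st' (pvGet s i) (pvGet s r) = st' := by
    intro i hli hir st'
    have : pvGet s l ≤ pvGet s i := pvMono s hs h0 hli (by omega)
    unfold pvBStep
    rw [if_neg]; omega
  have hsplitOuter : PySem.List.pyRange l r = PySem.List.pyRange l (r - 1) ++ [r - 1] := by
    have h := PySem.List.pyRange_one_succ_right (a := l) (b := r - 1) (by omega)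
    rwa [show r - 1 + 1 = r by omega] at h
  have hsplitInner : ∀ i : Int, i < r →
      PySem.List.pyRange (i + 1) (r + 1) = PySem.List.pyRange (i + 1) r ++ [r] := by
    intro i hi
    exact PySem.List.pyRange_one_succ_right (by omega)
  unfold pvBAll
  rw [hsplitOuter, List.foldl_append]
  rw [PySem.List.foldl_congr_mem _ _
    (fun st i => (PySem.List.pyRange (i + 1) (r - 1 + 1)).foldl
        (fun st j => pvBStep k st (pvGet s i) (pvGet s j)) st) st ?agree]
  case agree =>
    intro acc i hi
    have hi' := (PySem.List.mem_pyRange_one).1 hi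
    rw [hsplitInner i (by omega), List.foldl_append, show r - 1 + 1 = r by omega]
    simp only [List.foldl_cons, List.foldl_nil]
    exact hnoop i hi'.1 (by omega) _
  · simp only [List.foldl_cons, List.foldl_nil]
    rw [hsplitInner (r - 1) (by omega), show r - 1 + 1 = r by omega,
      PySem.List.pyRange_one_eq_nil (le_refl r), List.nil_append]
    simp only [List.foldl_cons, List.foldl_nil]
    exact hnoop (r - 1) (by omega) (by omega) _

-- main loop correspondence: A's two-pointer scan computes B's brute-force fold
lemma pvMain (s : List Int) (k : Int)
    (hs : ∀ p q : Nat, (hpq : p ≤ q) → (hq : q < s.length) → s[p]'(Nat.lt_of_le_of_lt hpq hq) ≤ s[q]) :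
    ∀ m : Nat, ∀ l r : Int, (r - l).toNat ≤ m → 0 ≤ l → r < (s.length : Int) → ∀ st,
      pvAGo s k l r st = (pvBAll s k l r st).1 := by
  intro m
  induction m with
  | zero =>
    intro l r hm h0 hr st
    have hlr : ¬ l < r := by omega
    rw [pvAGo, dif_neg hlr]
    unfold pvBAll
    rw [PySem.List.pyRange_one_eq_nil (by omega)]
    rfl
  | succ m ih =>
    intro l r hm h0 hr st
    by_cases hlr : l < r
    · rw [pvAGo, dif_pos hlr]
      by_cases hk : pvGet s l + pvGet s r ≥ k
      · simp only [hk, if_pos]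
        rw [ih l (r - 1) (by omega) h0 (by omega) st,
          pvColDrop s k hs l r h0 hlr hr hk st]
      · simp only [hk, if_false]
        have hrow : pvBAll s k l r st
            = pvBAll s k (l + 1) r (pvBStep k st (pvGet s l) (pvGet s r)) := by
          unfold pvBAll
          rw [PySem.List.pyRange_one_cons hlr]
          simp only [List.foldl_cons]
          rw [pvRowFold s k hs l h0 (r - l).toNat r rfl hlr hr (by omega) st]
        rw [hrow]
        by_cases hm2 : st.2 < pvGet s l + pvGet s r
        · have hb : pvBStep k st (pvGet s l) (pvGet s r)
              = ((pvGet s l, pvGet s r), pvGet s l + pvGet s r) := by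
            unfold pvBStep; rw [if_pos ⟨by omega, hm2⟩]
          rw [if_pos hm2, hb]
          exact ih (l + 1) r (by omega) (by omega) hr _
        · have hb : pvBStep k st (pvGet s l) (pvGet s r) = st := by
            unfold pvBStep; rw [if_neg (fun hc => hm2 hc.2)]
          rw [if_neg hm2, hb]
          exact ih (l + 1) r (by omega) (by omega) hr _
    · rw [pvAGo, dif_neg hlr]
      unfold pvBAll
      rw [PySem.List.pyRange_one_eq_nil (by omega)]
      rfl

-- ===== VERDICT (by name: the statement is the Claim_ definition above) =====
theorem find_max_sum_pair_spec : Claim_equal_find_max_sum_pair := by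
  intro arr n k _hdom hpre
  unfold Pre_find_max_sum_pair at hpre
  unfold Spec_find_max_sum_pair find_max_sum_pair find_max_sum_pair_alt
  generalize hsdef : PySem.List.sorted arr (fun x => x) false = s
  have hs : ∀ p q : Nat, (hpq : p ≤ q) → (hq : q < s.length) →
      s[p]'(Nat.lt_of_le_of_lt hpq hq) ≤ s[q] := by
    subst hsdef
    intro p q hpq hq
    exact PySem.List.sorted_id_getElem_mono arr hpq hq
  have hlen : s.length = arr.length := by
    subst hsdef; exact PySem.List.length_sorted arr _ _
  have hBGo : pvBGo s n k = (pvBAll s k 0 (n - 1) ((0, 0), -1)).1 := by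
    unfold pvBGo pvBAll
    rw [show n - 1 + 1 = n by omega]
  by_cases hn : 2 ≤ n
  · have hr : n - 1 < (s.length : Int) := by
      have := hpre hn; omega
    rw [hBGo]
    exact pvMain s k hs (n - 1 - 0).toNat 0 (n - 1) (le_refl _) (le_refl 0) hr _
  · rw [pvAGo, dif_neg (by omega : ¬ (0 : Int) < n - 1)]
    unfold pvBGo
    rw [PySem.List.pyRange_one_eq_nil (by omega : n - 1 ≤ 0)]
    rfl
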